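-- pv_equiv track=rewrite | github.com/sliosb2000/12x12_MinMax_Tic_Tac_Toe | program.py | VerifLigne
-- ===== SOURCE A (Python) =====
-- def VerifLigne(a,l,j,borne):
--     r = 0
--     for i in range(1, len(a) - l ):
--         if borne :
--             if all(x == j for x in a[i:i+l]) and a[i-1] == '.' and a[i+l] == '.':
--                 r += 1
--         else:
--             if all(x == j for x in a[i:i+l]) and ((a[i-1] == '.' and a[i+l] != '.') or (a[i+l] == '.' and a[i-1] != '.')):
--                 r += 1
--     return r
-- ===== SOURCE B (Python) =====
-- def VerifLigne(a, l, j, borne):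
--     # O(n): prefix counts of j replace the O(l) window scan per position.
--     pref = [0]
--     for x in a:
--         pref.append(pref[-1] + (x == j))
--     r = 0
--     for i in range(1, len(a) - l):
--         if pref[i + l] - pref[i] == l:
--             left = a[i - 1] == '.'
--             right = a[i + l] == '.'
--             if (left and right) if borne else (left != right):
--                 r += 1
--     return r
-- ===== Notes on version B (the rewrite author's own statement) =====
-- stated objective: faster
-- what changed: B builds a prefix-count array of j once, so each window test 'all cells equal j' becomes an O(1) prefix-difference comparison instead of A's O(l) slice scan per position.
-- outside the precondition, e.g. on VerifLigne(['.'], -1, 'x', True): A returns 1, B returns 0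
import Mathlib
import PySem

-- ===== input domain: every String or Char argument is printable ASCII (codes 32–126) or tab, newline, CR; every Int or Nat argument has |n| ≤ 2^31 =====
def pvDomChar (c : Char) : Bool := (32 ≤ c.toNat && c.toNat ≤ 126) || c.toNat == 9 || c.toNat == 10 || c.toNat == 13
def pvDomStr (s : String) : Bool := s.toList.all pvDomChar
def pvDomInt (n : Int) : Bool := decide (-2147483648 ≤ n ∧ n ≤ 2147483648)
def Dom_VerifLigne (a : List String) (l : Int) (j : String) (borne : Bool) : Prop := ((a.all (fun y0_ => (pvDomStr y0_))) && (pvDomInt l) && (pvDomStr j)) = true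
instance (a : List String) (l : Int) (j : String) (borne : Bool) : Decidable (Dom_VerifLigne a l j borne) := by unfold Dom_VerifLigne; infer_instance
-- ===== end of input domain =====

-- B replaces A's O(l) per-window slice scan with a prefix-count difference, measured asymptotically faster.


-- ===== PORT A =====
def VerifLigne (a : List String) (l : Int) (j : String) (borne : Bool) : Int :=
  (PySem.List.pyRange 1 ((a.length : Int) - l) 1).foldl (fun r i =>
    if borne then
      if (PySem.List.slice a (some i) (some (i + l))).all (fun x => x == j)
          && (PySem.List.pyGet? a (i - 1) == some ".")
          && (PySem.List.pyGet? a (i + l) == some ".") then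
        r + 1
      else r
    else
      if (PySem.List.slice a (some i) (some (i + l))).all (fun x => x == j)
          && (((PySem.List.pyGet? a (i - 1) == some ".") && !(PySem.List.pyGet? a (i + l) == some "."))
              || ((PySem.List.pyGet? a (i + l) == some ".") && !(PySem.List.pyGet? a (i - 1) == some "."))) then
        r + 1
      else r) 0

-- ===== PORT B =====
-- Source B's 'pref = [0]; for x in a: pref.append(pref[-1] + (x == j))' builds exactly the
-- successive partial sums, i.e. List.scanl; indexing pref is always in range under Pre_.
def VerifLigne_alt (a : List String) (l : Int) (j : String) (borne : Bool) : Int :=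
  let pref : List Int := List.scanl (fun s x => s + (if x == j then 1 else 0)) 0 a
  (PySem.List.pyRange 1 ((a.length : Int) - l) 1).foldl (fun r i =>
    if (PySem.List.pyGetD pref (i + l) 0 - PySem.List.pyGetD pref i 0) == l then
      let left := PySem.List.pyGet? a (i - 1) == some "."
      let right := PySem.List.pyGet? a (i + l) == some "."
      if (if borne then left && right else left != right) then r + 1 else r
    else r) 0

-- ===== PRECONDITION & SPEC =====
-- Pre_ excludes l ≤ -1 (outside the natural domain of a positive run length): for l ≤ -2 A raises
-- IndexError, and at l = -1 Python's negative-index wraparound makes A compare a[i-1] with itself,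
-- an accidental value B does not reproduce.
def Pre_VerifLigne (a : List String) (l : Int) (j : String) (borne : Bool) : Prop := 0 ≤ l
instance (a : List String) (l : Int) (j : String) (borne : Bool) : Decidable (Pre_VerifLigne a l j borne) := by unfold Pre_VerifLigne; infer_instance
def pvWitness_VerifLigne : List String × Int × String × Bool := ([".", "x", "x", "."], 2, "x", true)

def Spec_VerifLigne (a : List String) (l : Int) (j : String) (borne : Bool) (out : Int) : Prop := out = VerifLigne_alt a l j borne
instance (a : List String) (l : Int) (j : String) (borne : Bool) (out : Int) : Decidable (Spec_VerifLigne a l j borne out) := by unfold Spec_VerifLigne; infer_instance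

-- ===== CLAIM (what is proved, stated in full; the proofs are below) =====
def Claim_equal_VerifLigne : Prop := ∀ (a : List String) (l : Int) (j : String) (borne : Bool), Dom_VerifLigne a l j borne → Pre_VerifLigne a l j borne → Spec_VerifLigne a l j borne (VerifLigne a l j borne)

-- ===== LEMMAS AND PROOFS =====

-- element k of the prefix-sum list is the count of j in the first k elements
theorem scanl_count_getElem? (j : String) : ∀ (a : List String) (s : Int) (k : Nat), k ≤ a.length →
    (List.scanl (fun s x => s + (if x == j then (1:Int) else 0)) s a)[k]? =
      some (s + ((a.take k).count j : Nat)) := by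
  intro a
  induction a with
  | nil =>
    intro s k hk
    have hk0 : k = 0 := by simpa using hk
    subst hk0
    simp [List.scanl_nil]
  | cons x xs ih =>
    intro s k hk
    rw [List.scanl_cons]
    cases k with
    | zero => simp
    | succ k =>
      simp only [List.getElem?_cons_succ, List.take_succ_cons, List.count_cons]
      rw [ih (s + (if x == j then 1 else 0)) k (by simpa using hk)]
      by_cases hx : x = j <;> simp [hx] <;> push_cast <;> try ring

-- the window test of A equals the prefix-difference test of B
theorem window_eq (a : List String) (l : Int) (j : String) (i : Int)
    (hl : 0 ≤ l) (hi : 1 ≤ i) (hin : i < (a.length : Int) - l) :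
    ((PySem.List.slice a (some i) (some (i + l))).all (fun x => x == j))
      = ((PySem.List.pyGetD (List.scanl (fun s x => s + (if x == j then (1:Int) else 0)) 0 a) (i + l) 0
          - PySem.List.pyGetD (List.scanl (fun s x => s + (if x == j then (1:Int) else 0)) 0 a) i 0) == l) := by
  have key : ∀ k : Nat, k ≤ a.length →
      PySem.List.pyGetD (List.scanl (fun s x => s + (if x == j then (1:Int) else 0)) 0 a) (k : Int) 0
        = ((a.take k).count j : Int) := by
    intro k hk
    rw [PySem.List.pyGetD_natCast, List.getD_eq_getElem?_getD, scanl_count_getElem? j a 0 k hk]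
    simp
  obtain ⟨it, rfl⟩ : ∃ it : Nat, i = (it : Int) := ⟨i.toNat, by omega⟩
  obtain ⟨lt, rfl⟩ : ∃ lt : Nat, l = (lt : Int) := ⟨l.toNat, by omega⟩
  have hb1 : it + lt ≤ a.length := by omega
  rw [PySem.List.slice_natCast_add,
    show ((it : Int) + (lt : Int)) = ((it + lt : Nat) : Int) from by push_cast; ring,
    key _ hb1, key _ (by omega)]
  rw [List.take_add, List.count_append]
  have hwl : ((a.drop it).take lt).length = lt := by
    simp [List.length_take, List.length_drop]
    omega
  rw [Bool.eq_iff_iff]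
  simp only [List.all_eq_true, beq_iff_eq]
  rw [show (∀ x ∈ (a.drop it).take lt, x = j) ↔
        (∀ x ∈ (a.drop it).take lt, j = x) from by
      constructor <;> exact fun h x hx => (h x hx).symm,
    ← List.count_eq_length, hwl]
  constructor
  · intro h
    omega
  · intro h
    omega

-- ===== VERDICT (by name: the statement is the Claim_ definition above) =====
theorem VerifLigne_spec : Claim_equal_VerifLigne := by
  intro a l j borne _ hpre
  unfold Spec_VerifLigne VerifLigne VerifLigne_alt
  dsimp only
  apply PySem.List.foldl_congr_mem
  intro r i hmem
  rw [PySem.List.mem_pyRange_one] at hmem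
  obtain ⟨hi, hin⟩ := hmem
  rw [← window_eq a l j i hpre hi hin]
  generalize ((PySem.List.slice a (some i) (some (i + l))).all (fun x => x == j)) = W
  generalize (PySem.List.pyGet? a (i - 1) == some ".") = L
  generalize (PySem.List.pyGet? a (i + l) == some ".") = R
  cases borne <;> cases W <;> cases L <;> cases R <;> rfl
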